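-- pv_equiv track=rewrite | github.com/TCrawley11/ml-experiments | tokenizer/bpe/src/bpe.py | generate_io_pairs
-- ===== SOURCE A (Python) =====
-- def generate_io_pairs(ids, context_size=4):
--     # If ids is a list of lists, flatten it.
--     if ids and isinstance(ids[0], list):
--         ids = [item for sublist in ids for item in sublist]
--
--     # Generate non-overlapping input/output pairs
--     # The step size is context_size + 1 to move to the next chunk
--     step = context_size + 1
--     for i in range(0, len(ids) - step + 1, step):
--         ctx = ids[i:i+context_size]
--         target = [ids[i+context_size]] # Target is a list with a single token ID
--         yield ctx, target
-- ===== SOURCE B (Python) =====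
-- def generate_io_pairs(ids, context_size=4):
--     # If ids is a list of lists, flatten it.
--     if ids and isinstance(ids[0], list):
--         ids = [item for sublist in ids for item in sublist]
--
--     # One pass: fill a buffer token by token; each time it holds a full
--     # context+target chunk, emit it and start a fresh buffer. A trailing
--     # partial buffer is never emitted.
--     step = context_size + 1
--     buf = []
--     for tok in ids:
--         buf.append(tok)
--         if len(buf) == step:
--             yield buf[:context_size], [buf[context_size]]
--             buf = []
-- ===== Notes on version B (the rewrite author's own statement) =====
-- stated objective: alternative
-- what changed: Replaces the stride-indexed range loop with slicing by a single pass that fills a buffer token by token and emits (buffer[:context_size], [buffer[context_size]]) whenever the buffer is full, dropping any trailing partial buffer.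
import Mathlib
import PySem

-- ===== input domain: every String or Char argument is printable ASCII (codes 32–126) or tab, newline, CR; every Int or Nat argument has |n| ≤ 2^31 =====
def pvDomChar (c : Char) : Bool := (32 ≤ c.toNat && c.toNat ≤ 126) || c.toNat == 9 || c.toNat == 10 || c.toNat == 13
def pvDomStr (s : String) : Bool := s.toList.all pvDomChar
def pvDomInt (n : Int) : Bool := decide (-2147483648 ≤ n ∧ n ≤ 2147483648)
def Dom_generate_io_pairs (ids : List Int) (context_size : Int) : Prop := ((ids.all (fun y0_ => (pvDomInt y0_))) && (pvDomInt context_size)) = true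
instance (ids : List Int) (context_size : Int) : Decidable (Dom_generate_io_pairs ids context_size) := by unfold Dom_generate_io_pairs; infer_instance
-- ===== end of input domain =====

-- B replaces A's stride-indexed range/slice loop by a single buffer-filling pass; equivalence of the yielded sequences is proved for context_size ≠ -1.

-- ===== PORT A =====
-- ids : List Int, so Python's `isinstance(ids[0], list)` flatten guard is statically False and contributes nothing.
def generate_io_pairs (ids : List Int) (context_size : Int) : List (List Int × List Int) :=
  let step := context_size + 1
  (PySem.List.pyRange 0 ((ids.length : Int) - step + 1) step).foldl
    (fun acc i =>
      acc ++ [(PySem.List.slice ids (some i) (some (i + context_size)),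
               (match PySem.List.pyGet? ids (i + context_size) with
                | some v => [v]
                | none => []))])  -- `none` is unreachable: every generated index is in range
    []

-- ===== PORT B =====
def generate_io_pairs_alt (ids : List Int) (context_size : Int) : List (List Int × List Int) :=
  let step := context_size + 1
  (ids.foldl
    (fun (st : List Int × List (List Int × List Int)) tok =>
      let buf := st.1 ++ [tok]
      if (buf.length : Int) = step then
        (([] : List Int),
         st.2 ++ [(PySem.List.slice buf none (some context_size),
                   (match PySem.List.pyGet? buf context_size with
                    | some v => [v]
                    | none => []))])
      else (buf, st.2))
    ([], [])).2

-- ===== PRECONDITION & SPEC =====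
-- Pre_ excludes only context_size = -1, where Python A's range(0, …, 0) raises ValueError.
def Pre_generate_io_pairs (ids : List Int) (context_size : Int) : Prop := context_size ≠ -1
instance (ids : List Int) (context_size : Int) : Decidable (Pre_generate_io_pairs ids context_size) := by unfold Pre_generate_io_pairs; infer_instance
def pvWitness_generate_io_pairs : List Int × Int := ([1, 2, 3, 4, 5, 6, 7], 2)

def Spec_generate_io_pairs (ids : List Int) (context_size : Int) (out : List (List Int × List Int)) : Prop := out = generate_io_pairs_alt ids context_size
instance (ids : List Int) (context_size : Int) (out : List (List Int × List Int)) : Decidable (Spec_generate_io_pairs ids context_size out) := by unfold Spec_generate_io_pairs; infer_instance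

-- ===== CLAIM (what is proved, stated in full; the proofs are below) =====
def Claim_equal_generate_io_pairs : Prop := ∀ (ids : List Int) (context_size : Int), Dom_generate_io_pairs ids context_size → Pre_generate_io_pairs ids context_size → Spec_generate_io_pairs ids context_size (generate_io_pairs ids context_size)

-- ===== LEMMAS AND PROOFS =====

-- Common reference value: the list of non-overlapping (context, target) chunks.
def pvChunks (c : Nat) (l : List Int) : List (List Int × List Int) :=
  if h : c + 1 ≤ l.length then
    (l.take c, [l[c]'(by omega)]) :: pvChunks c (l.drop (c + 1))
  else []
termination_by l.length
decreasing_by simp; omega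

-- The pair A builds at index (c+1)*k, in Nat form.
def pvPair (c : Nat) (l : List Int) (k : Nat) : List Int × List Int :=
  ((l.drop ((c + 1) * k)).take c,
   (match l[(c + 1) * k + c]? with | some v => [v] | none => []))

-- B's accumulator, mirroring the fold body.
def pvAccB (cs : Int) : List Int → List Int → List (List Int × List Int)
  | _, [] => []
  | b, t :: l =>
    if (((b ++ [t]).length : Int) = cs + 1) then
      (PySem.List.slice (b ++ [t]) none (some cs),
       (match PySem.List.pyGet? (b ++ [t]) cs with | some v => [v] | none => [])) :: pvAccB cs [] l
    else pvAccB cs (b ++ [t]) l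

theorem pvB_fold (cs : Int) (l b : List Int) (out : List (List Int × List Int)) :
    (l.foldl
      (fun (st : List Int × List (List Int × List Int)) tok =>
        if (((st.1 ++ [tok]).length : Int) = cs + 1) then
          (([] : List Int),
           st.2 ++ [(PySem.List.slice (st.1 ++ [tok]) none (some cs),
                     (match PySem.List.pyGet? (st.1 ++ [tok]) cs with
                      | some v => [v]
                      | none => []))])
        else (st.1 ++ [tok], st.2))
      (b, out)).2 = out ++ pvAccB cs b l := by
  induction l generalizing b out with
  | nil => simp [pvAccB]
  | cons t l ih =>
    simp only [List.foldl_cons, pvAccB]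
    by_cases h : (((b ++ [t]).length : Int) = cs + 1)
    · rw [if_pos h, if_pos h, ih]
      simp
    · rw [if_neg h, if_neg h, ih]

theorem pvAccB_nonpos (cs : Int) (h : cs + 1 ≤ 0) (l : List Int) :
    ∀ b, pvAccB cs b l = [] := by
  induction l with
  | nil => intro b; simp [pvAccB]
  | cons t l ih =>
    intro b
    have hne : ¬ (((b ++ [t]).length : Int) = cs + 1) := by
      have : 1 ≤ (b ++ [t]).length := by simp
      intro hc; omega
    simp only [pvAccB]
    rw [if_neg hne]
    exact ih _

theorem pvAccB_eq_chunks (c : Nat) (l : List Int) :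
    ∀ b, b.length ≤ c → pvAccB (c : Int) b l = pvChunks c (b ++ l) := by
  induction l with
  | nil =>
    intro b hb
    rw [List.append_nil, pvChunks, dif_neg (by omega : ¬ c + 1 ≤ b.length)]
    simp [pvAccB]
  | cons t l ih =>
    intro b hb
    by_cases h : (((b ++ [t]).length : Int) = (c : Int) + 1)
    · have hN : (b ++ [t]).length = c + 1 := by exact_mod_cast h
      have hbl : b.length = c := by simp at hN; omega
      have hbuf : b ++ t :: l = (b ++ [t]) ++ l := by simp
      have hlen : (b ++ t :: l).length = c + 1 + l.length := by
        simp only [List.length_append, List.length_cons, hbl]; omega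
      rw [pvChunks, dif_pos (by omega)]
      simp only [pvAccB]
      rw [if_pos h, ih [] (by simp)]
      simp only [List.nil_append]
      congr 1
      · -- heads agree
        simp only [Prod.mk.injEq]
        constructor
        · rw [PySem.List.slice_to_natCast, hbuf,
              List.take_append_of_le_length (l₁ := b ++ [t]) (l₂ := l) (by omega)]
        · have hv : (b ++ t :: l)[c]? = (b ++ [t])[c]? := by
            rw [hbuf]; exact List.getElem?_append_left (by omega)
          rw [PySem.List.pyGet?_natCast, ← hv,
              List.getElem?_eq_getElem (show c < (b ++ t :: l).length by omega)]
      · -- tails agree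
        rw [hbuf, List.drop_append_of_le_length (by omega), ← hN, List.drop_length,
            List.nil_append]
    · have hle : (b ++ [t]).length ≤ c := by
        have : (b ++ [t]).length ≤ c + 1 := by simp; omega
        have hne : (b ++ [t]).length ≠ c + 1 := by
          intro hc; exact h (by exact_mod_cast hc)
        omega
      simp only [pvAccB]
      rw [if_neg h, ih _ hle]
      simp

theorem pvB_eq_chunks (ids : List Int) (c : Nat) :
    generate_io_pairs_alt ids (c : Int) = pvChunks c ids := by
  simp only [generate_io_pairs_alt]
  rw [pvB_fold (c : Int) ids [] []]
  simpa using pvAccB_eq_chunks c ids [] (by simp)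

theorem pvA_eq_map (c : Nat) (l : List Int) :
    generate_io_pairs l (c : Int) = (List.range (l.length / (c + 1))).map (pvPair c l) := by
  have hs : (0 : Int) < (c : Int) + 1 := by positivity
  simp only [generate_io_pairs]
  rw [PySem.List.pyRange_of_pos 0 _ hs, List.foldl_map,
      PySem.List.foldl_append_singleton_eq_map]
  have hm : (if (0:Int) < (l.length : Int) - ((c : Int) + 1) + 1 then
      (((l.length : Int) - ((c : Int) + 1) + 1 - 0 + ((c : Int) + 1) - 1) / ((c : Int) + 1)).toNat else 0)
      = l.length / (c + 1) := by
    split_ifs with h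
    · have h1 : ((l.length : Int) - ((c : Int) + 1) + 1 - 0 + ((c : Int) + 1) - 1) = (l.length : Int) := by ring
      rw [h1]
      have h2 : ((c : Int) + 1) = ((c + 1 : Nat) : Int) := by push_cast; ring
      rw [h2, ← Int.natCast_div, Int.toNat_natCast]
    · exact (Nat.div_eq_of_lt (by omega)).symm
  rw [hm, List.nil_append]
  apply List.map_congr_left
  intro k _
  have hi : 0 + ((c : Int) + 1) * (k : Int) = (((c + 1) * k : Nat) : Int) := by push_cast; ring
  have hj : (((c + 1) * k : Nat) : Int) + (c : Int) = (((c + 1) * k + c : Nat) : Int) := by push_cast; ring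
  simp only [pvPair, Prod.mk.injEq]
  rw [hi]
  constructor
  · rw [hj, PySem.List.slice_natCast]
    congr 1
    omega
  · rw [hj, PySem.List.pyGet?_natCast]

theorem pvMap_eq_chunks (c : Nat) : ∀ (n : Nat) (l : List Int), l.length = n →
    (List.range (l.length / (c + 1))).map (pvPair c l) = pvChunks c l := by
  intro n
  induction n using Nat.strong_induction_on with
  | _ n ih =>
    intro l hl
    by_cases h : c + 1 ≤ l.length
    · have hdiv : l.length / (c + 1) = (l.length - (c + 1)) / (c + 1) + 1 :=
        Nat.div_eq_sub_div (by omega) h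
      rw [pvChunks, dif_pos h, hdiv, List.range_succ_eq_map, List.map_cons, List.map_map]
      congr 1
      · -- head
        have h0 : (c + 1) * 0 = 0 := Nat.mul_zero _
        simp only [pvPair, h0, List.drop_zero, Nat.zero_add]
        rw [List.getElem?_eq_getElem (show c < l.length by omega)]
      · -- tail
        have hdl : (l.drop (c + 1)).length = l.length - (c + 1) := by simp
        have hrec := ih (n - (c + 1)) (by omega) (l.drop (c + 1)) (by omega)
        rw [hdl] at hrec
        rw [← hrec]
        apply List.map_congr_left
        intro k _
        simp only [Function.comp_apply, pvPair, Nat.succ_eq_add_one, Prod.mk.injEq]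
        have e1 : (c + 1) * (k + 1) = (c + 1) + (c + 1) * k := by ring
        rw [e1, show c + 1 + (c + 1) * k + c = c + 1 + ((c + 1) * k + c) from by ring,
            ← List.drop_drop, ← List.getElem?_drop]
        exact ⟨rfl, rfl⟩
    · rw [pvChunks, dif_neg h, Nat.div_eq_of_lt (by omega), List.range_zero, List.map_nil]

theorem pvA_neg (ids : List Int) (cs : Int) (h : cs + 1 < 0) :
    generate_io_pairs ids cs = [] := by
  simp only [generate_io_pairs]
  rw [PySem.List.pyRange_of_neg 0 _ h]
  have hnb : ¬ ((ids.length : Int) - (cs + 1) + 1 < 0) := by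
    have : (0:Int) ≤ (ids.length : Int) := by positivity
    omega
  rw [if_neg hnb]
  simp

theorem pvB_nonpos (ids : List Int) (cs : Int) (h : cs + 1 ≤ 0) :
    generate_io_pairs_alt ids cs = [] := by
  simp only [generate_io_pairs_alt]
  rw [pvB_fold cs ids [] [], pvAccB_nonpos cs h ids []]
  rfl

-- ===== VERDICT (by name: the statement is the Claim_ definition above) =====
theorem generate_io_pairs_spec : Claim_equal_generate_io_pairs := by
  intro ids cs _hDom hPre
  unfold Spec_generate_io_pairs
  by_cases h : 0 ≤ cs
  · obtain ⟨c, rfl⟩ : ∃ c : Nat, cs = (c : Int) := ⟨cs.toNat, (Int.toNat_of_nonneg h).symm⟩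
    rw [pvA_eq_map c ids, pvB_eq_chunks ids c, pvMap_eq_chunks c ids.length ids rfl]
  · have hne : cs ≠ -1 := hPre
    have hlt : cs + 1 < 0 := by omega
    rw [pvA_neg ids cs hlt, pvB_nonpos ids cs (le_of_lt hlt)]
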